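-- pv_equiv track=rewrite | github.com/EmanuelStoyanov/homework1 | sudoku_solved/solution.py | wrong
-- ===== SOURCE A (Python) =====
-- def wrong(list):
--     from_one_to_nine = [1, 2, 3, 4, 5, 6, 7, 8, 9]
--     for number in list:
--         if member(number, from_one_to_nine):
--             from_one_to_nine.remove(number)
--         else:
--             return True
--     return len(from_one_to_nine) > 0
--
-- def member(needle, list):
--     for number in list:
--         if needle == number:
--             return True
--     return False
-- ===== SOURCE B (Python) =====
-- def wrong(list):
--     return not (len(list) == 9 and set(list) == set(range(1, 10)))
-- ===== Notes on version B (the rewrite author's own statement) =====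
-- stated objective: simpler
-- what changed: Replaces the per-element membership scan with mutating removal from a working list by a single length check plus a set comparison against {1..9}.
import Mathlib
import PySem

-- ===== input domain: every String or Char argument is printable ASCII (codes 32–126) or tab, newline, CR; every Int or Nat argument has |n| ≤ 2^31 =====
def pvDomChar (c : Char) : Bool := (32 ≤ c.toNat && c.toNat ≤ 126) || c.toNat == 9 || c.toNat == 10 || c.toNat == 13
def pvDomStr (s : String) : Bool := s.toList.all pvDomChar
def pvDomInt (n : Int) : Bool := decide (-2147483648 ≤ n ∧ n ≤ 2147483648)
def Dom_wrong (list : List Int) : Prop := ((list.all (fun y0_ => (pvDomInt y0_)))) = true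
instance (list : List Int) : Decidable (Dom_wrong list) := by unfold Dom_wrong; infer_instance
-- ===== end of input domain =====

-- B replaces A's per-element scan with mutating removal by one length check plus a set comparison ('simpler').

-- ===== PORT A =====
def member (needle : Int) (list : List Int) : Bool :=
  match list with
  | [] => false
  | number :: rest => if needle == number then true else member needle rest

def wrongLoop (list : List Int) (from_one_to_nine : List Int) : Bool :=
  match list with
  | [] => decide (from_one_to_nine.length > 0)
  | number :: rest =>
      if member number from_one_to_nine then
        wrongLoop rest ((PySem.List.remove? from_one_to_nine number).getD from_one_to_nine)
      else
        true

def wrong (list : List Int) : Bool :=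
  wrongLoop list [1, 2, 3, 4, 5, 6, 7, 8, 9]

-- ===== PORT B =====
def wrong_alt (list : List Int) : Bool :=
  !(decide (list.length = 9) &&
    PySem.Set.equal (PySem.Set.ofList list) (PySem.Set.ofList (PySem.List.pyRange 1 10 1)))

-- ===== PRECONDITION & SPEC =====
def Spec_wrong (list : List Int) (out : Bool) : Prop := out = wrong_alt list
instance (list : List Int) (out : Bool) : Decidable (Spec_wrong list out) := by unfold Spec_wrong; infer_instance

-- ===== CLAIM (what is proved, stated in full; the proofs are below) =====
def Claim_equal_wrong : Prop := ∀ (list : List Int), Dom_wrong list → Spec_wrong list (wrong list)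

-- ===== LEMMAS AND PROOFS =====

theorem member_iff (v : Int) (l : List Int) : member v l = true ↔ v ∈ l := by
  induction l with
  | nil => simp [member]
  | cons x xs ih =>
      simp only [member]
      by_cases h : v = x
      · simp [h]
      · simp [h, ih, beq_iff_eq]

-- A's loop returns false exactly when the scanned list is a permutation of the remaining pool.
theorem wrongLoop_eq_false_iff (l rem : List Int) :
    wrongLoop l rem = false ↔ l.Perm rem := by
  induction l generalizing rem with
  | nil =>
      simp only [wrongLoop]
      constructor
      · intro h
        have : rem = [] := by
          cases rem with
          | nil => rfl
          | cons a as => simp at h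
        simp [this]
      · intro h
        have : rem = [] := h.symm.eq_nil
        simp [this]
  | cons x xs ih =>
      simp only [wrongLoop]
      by_cases hm : member x rem = true
      · have hx : x ∈ rem := (member_iff x rem).1 hm
        rw [PySem.List.remove?_eq_some_erase rem x hx]
        simp only [Option.getD_some, hm, if_true]
        rw [ih, List.cons_perm_iff_perm_erase]
        exact ⟨fun h => ⟨hx, h⟩, fun h => h.2⟩
      · simp only [hm, Bool.false_eq_true, if_false]
        constructor
        · intro h; simp at h
        · intro h
          have hx : x ∈ rem := h.subset List.mem_cons_self
          exact absurd ((member_iff x rem).2 hx) hm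

theorem perm_iff_len_and_set (l : List Int) :
    l.Perm [1, 2, 3, 4, 5, 6, 7, 8, 9] ↔
      l.length = 9 ∧ (∀ x : Int, x ∈ l ↔ x ∈ ([1, 2, 3, 4, 5, 6, 7, 8, 9] : List Int)) := by
  constructor
  · intro h
    exact ⟨h.length_eq, fun x => h.mem_iff⟩
  · rintro ⟨hlen, hmem⟩
    have hnd9 : ([1, 2, 3, 4, 5, 6, 7, 8, 9] : List Int).Nodup := by decide
    have hsub := List.dedup_sublist l
    have hdd : l.dedup.length = 9 := by
      have hfin : l.toFinset = ([1, 2, 3, 4, 5, 6, 7, 8, 9] : List Int).toFinset := by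
        ext x; simp [hmem x]
      have hcard : l.toFinset.card = 9 := by rw [hfin]; decide
      rw [List.card_toFinset] at hcard
      exact hcard
    have heq : l.dedup = l := hsub.eq_of_length (by have := hsub.length_le; omega)
    have hnd : l.Nodup := heq ▸ List.nodup_dedup l
    exact (List.perm_ext_iff_of_nodup hnd hnd9).mpr hmem

-- ===== VERDICT (by name: the statement is the Claim_ definition above) =====
theorem wrong_spec : Claim_equal_wrong := by
  intro l _
  unfold Spec_wrong wrong wrong_alt
  have hr : PySem.List.pyRange 1 10 1 = ([1, 2, 3, 4, 5, 6, 7, 8, 9] : List Int) := by decide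
  have hnd9 : ([1, 2, 3, 4, 5, 6, 7, 8, 9] : List Int).Nodup := by decide
  have hset : PySem.Set.equal (PySem.Set.ofList l)
      (PySem.Set.ofList (PySem.List.pyRange 1 10 1)) = true ↔
      (∀ x : Int, x ∈ l ↔ x ∈ ([1, 2, 3, 4, 5, 6, 7, 8, 9] : List Int)) := by
    rw [hr, PySem.Set.ofList_eq_self_of_nodup _ hnd9, PySem.Set.equal_iff]
    constructor
    · intro h x; rw [← PySem.Set.mem_ofList l x]; exact h x
    · intro h x; rw [PySem.Set.mem_ofList l x]; exact h x
  cases hW : wrongLoop l [1, 2, 3, 4, 5, 6, 7, 8, 9] with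
  | false =>
      have hp := (wrongLoop_eq_false_iff l _).1 hW
      rcases (perm_iff_len_and_set l).1 hp with ⟨hlen, hmem⟩
      simp [hlen, hset.2 hmem]
  | true =>
      have hp : ¬ l.Perm [1, 2, 3, 4, 5, 6, 7, 8, 9] := by
        intro h
        have := (wrongLoop_eq_false_iff l _).2 h
        rw [hW] at this
        exact Bool.true_eq_false.mp this
      by_cases hlen : l.length = 9
      · by_cases hm : ∀ x : Int, x ∈ l ↔ x ∈ ([1, 2, 3, 4, 5, 6, 7, 8, 9] : List Int)
        · exact absurd ((perm_iff_len_and_set l).2 ⟨hlen, hm⟩) hp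
        · have : PySem.Set.equal (PySem.Set.ofList l)
              (PySem.Set.ofList (PySem.List.pyRange 1 10 1)) = false := by
            rw [Bool.eq_false_iff]
            intro hc
            exact hm (hset.1 hc)
          simp [this]
      · simp [hlen]
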